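-- pv_equiv track=rewrite | github.com/VuSnow/OOP_20242_Chatbot_LLM | server/convert_json_to_txt.py | get_best_price
-- ===== SOURCE A (Python) =====
-- def get_best_price(prices):
--     if not prices or not isinstance(prices, dict):
--         return ""
--     # Map tên key sang tiếng Việt ưu tiên và hiển thị
--     priority_keys = [
--         "special", "root", "smem", "svip"
--     ]
--     name_map = {
--         "root": "Giá niêm yết",
--         "special": "Giá khuyến mãi",
--         "smem": "Giá thành viên",
--         "svip": "Giá VIP",
--         "smem_student": "Giá thành viên (Học sinh)",
--         "smem_teacher": "Giá thành viên (Giáo viên)",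
--         "snew_student": "Giá thành viên mới (Học sinh)",
--         "snew_teacher": "Giá thành viên mới (Giáo viên)",
--         "snull_student": "Giá không phân loại (Học sinh)",
--         "snull_teacher": "Giá không phân loại (Giáo viên)",
--         "svip_student": "Giá VIP (Học sinh)",
--         "svip_teacher": "Giá VIP (Giáo viên)",
--     }
--     price_strs = []
--
--     # Ưu tiên các giá phổ biến lên đầu (nếu có)
--     for k in priority_keys:
--         v = prices.get(k)
--         if v is None or not isinstance(v, dict):
--             continue
--         price = v.get('value')
--         discount = v.get('discount_value', 0)
--         if price is None:
--             continue
--         key_name = name_map.get(k, f"Giá {k}")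
--         if discount and int(discount) > 0:
--             price_strs.append(f"{key_name}: {int(price):,} VNĐ (giảm {int(discount):,} VNĐ)")
--         else:
--             price_strs.append(f"{key_name}: {int(price):,} VNĐ")
--
--     # Thêm tất cả các giá còn lại (không trùng)
--     for k, v in prices.items():
--         if k in priority_keys:
--             continue
--         if v is None or not isinstance(v, dict):
--             continue
--         price = v.get('value')
--         discount = v.get('discount_value', 0)
--         if price is None:
--             continue
--         key_name = name_map.get(k, f"Giá {k}")
--         if discount and int(discount) > 0:
--             price_strs.append(f"{key_name}: {int(price):,} VNĐ (giảm {int(discount):,} VNĐ)")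
--         else:
--             price_strs.append(f"{key_name}: {int(price):,} VNĐ")
--
--     return "\n".join(price_strs)
-- ===== SOURCE B (Python) =====
-- def get_best_price(prices):
--     if not prices or not isinstance(prices, dict):
--         return ""
--     priority_keys = ["special", "root", "smem", "svip"]
--     name_map = {
--         "root": "Giá niêm yết",
--         "special": "Giá khuyến mãi",
--         "smem": "Giá thành viên",
--         "svip": "Giá VIP",
--         "smem_student": "Giá thành viên (Học sinh)",
--         "smem_teacher": "Giá thành viên (Giáo viên)",
--         "snew_student": "Giá thành viên mới (Học sinh)",
--         "snew_teacher": "Giá thành viên mới (Giáo viên)",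
--         "snull_student": "Giá không phân loại (Học sinh)",
--         "snull_teacher": "Giá không phân loại (Giáo viên)",
--         "svip_student": "Giá VIP (Học sinh)",
--         "svip_teacher": "Giá VIP (Giáo viên)",
--     }
--     rank = {k: i for i, k in enumerate(priority_keys)}
--
--     def fmt_entry(k, v):
--         if v is None or not isinstance(v, dict):
--             return None
--         price = v.get('value')
--         if price is None:
--             return None
--         discount = v.get('discount_value', 0)
--         name = name_map.get(k, f"Giá {k}")
--         if int(discount) > 0:
--             return f"{name}: {int(price):,} VNĐ (giảm {int(discount):,} VNĐ)"
--         return f"{name}: {int(price):,} VNĐ"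
--
--     # one pass: tag each formatted line with its priority rank, group into rank buckets
--     pairs = [(rank.get(k, 4), line)
--              for k, v in prices.items()
--              if (line := fmt_entry(k, v)) is not None]
--     groups = {}
--     for r, line in pairs:
--         groups[r] = groups.get(r, []) + [line]
--     return "\n".join(line for r in range(5) for line in groups.get(r, []))
-- ===== Notes on version B (the rewrite author's own statement) =====
-- stated objective: alternative
-- what changed: Replaces A's two staged loops (priority-key lookups, then a membership-filtered scan of the dict) by a single pass that tags every formatted line with a priority rank and bucket-groups the lines in a dict keyed by rank, emitting the buckets in rank order.
import Mathlib
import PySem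

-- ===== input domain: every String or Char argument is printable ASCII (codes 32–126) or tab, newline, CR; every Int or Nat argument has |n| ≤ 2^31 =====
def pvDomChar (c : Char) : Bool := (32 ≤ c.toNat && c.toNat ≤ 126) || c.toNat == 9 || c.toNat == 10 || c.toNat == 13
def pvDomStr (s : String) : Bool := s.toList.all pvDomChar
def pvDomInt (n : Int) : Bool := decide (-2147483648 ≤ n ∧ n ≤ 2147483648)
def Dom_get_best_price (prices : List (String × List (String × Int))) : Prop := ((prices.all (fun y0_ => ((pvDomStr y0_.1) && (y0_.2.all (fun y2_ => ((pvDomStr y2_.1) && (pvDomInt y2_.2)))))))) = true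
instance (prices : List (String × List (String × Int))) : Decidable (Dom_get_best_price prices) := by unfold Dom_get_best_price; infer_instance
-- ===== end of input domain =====

-- B replaces A's two staged loops (priority lookups, then a membership-filtered scan) by a
-- single pass that tags each formatted line with a priority rank and bucket-groups the lines
-- in a dict keyed by rank, emitted in rank order (objective: alternative decomposition).

-- shared literal constants of both Pythons
def pvPriority : List String := ["special", "root", "smem", "svip"]

def pvNameMap : List (String × String) :=
  [("root", "Giá niêm yết"), ("special", "Giá khuyến mãi"), ("smem", "Giá thành viên"),
   ("svip", "Giá VIP"), ("smem_student", "Giá thành viên (Học sinh)"),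
   ("smem_teacher", "Giá thành viên (Giáo viên)"), ("snew_student", "Giá thành viên mới (Học sinh)"),
   ("snew_teacher", "Giá thành viên mới (Giáo viên)"), ("snull_student", "Giá không phân loại (Học sinh)"),
   ("snull_teacher", "Giá không phân loại (Giáo viên)"), ("svip_student", "Giá VIP (Học sinh)"),
   ("svip_teacher", "Giá VIP (Giáo viên)")]

-- port of the f-string format spec "{n:,}" (thousands separators), used by both ports
def pvGrp : Nat → List Char → List Char
  | _, [] => []
  | i, c :: cs => if i % 3 == 0 && i ≠ 0 then ',' :: c :: pvGrp (i + 1) cs else c :: pvGrp (i + 1) cs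

def commaFmt (n : Int) : String :=
  String.ofList ((if n < 0 then ['-'] else []) ++ (pvGrp 0 (Nat.toDigits 10 n.natAbs).reverse).reverse)

-- ===== PORT A =====
-- (the Python's 'isinstance' guards are identities on the typed domain and 'v is None'
-- cannot arise: dict values here are always dicts of Int)
-- body of A's first loop (over priority_keys)
def pvStepA1 (prices : List (String × List (String × Int))) (acc : List String) (k : String) : List String :=
  match (PySem.Dict.mk prices).get? k with
  | none => acc
  | some v =>
    match (PySem.Dict.mk v).get? "value" with
    | none => acc
    | some price =>
      let discount := (PySem.Dict.mk v).getD "discount_value" 0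
      let keyName := (PySem.Dict.mk pvNameMap).getD k ("Giá " ++ k)
      if discount ≠ 0 ∧ discount > 0 then
        acc ++ [keyName ++ ": " ++ commaFmt price ++ " VNĐ (giảm " ++ commaFmt discount ++ " VNĐ)"]
      else
        acc ++ [keyName ++ ": " ++ commaFmt price ++ " VNĐ"]

-- body of A's second loop (over prices.items())
def pvStepA2 (acc : List String) (kv : String × List (String × Int)) : List String :=
  if pvPriority.contains kv.1 then acc
  else
    match (PySem.Dict.mk kv.2).get? "value" with
    | none => acc
    | some price =>
      let discount := (PySem.Dict.mk kv.2).getD "discount_value" 0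
      let keyName := (PySem.Dict.mk pvNameMap).getD kv.1 ("Giá " ++ kv.1)
      if discount ≠ 0 ∧ discount > 0 then
        acc ++ [keyName ++ ": " ++ commaFmt price ++ " VNĐ (giảm " ++ commaFmt discount ++ " VNĐ)"]
      else
        acc ++ [keyName ++ ": " ++ commaFmt price ++ " VNĐ"]

def get_best_price (prices : List (String × List (String × Int))) : String :=
  if prices.isEmpty then ""
  else
    let s1 := pvPriority.foldl (pvStepA1 prices) []
    let s2 := prices.foldl pvStepA2 s1
    PySem.Str.join "\n" s2

-- ===== PORT B =====
-- B's rank dict {k: i for i, k in enumerate(priority_keys)}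
def pvRank : List (String × Int) := [("special", 0), ("root", 1), ("smem", 2), ("svip", 3)]

-- B's fmt_entry helper
def fmtEntry (k : String) (v : List (String × Int)) : Option String :=
  match (PySem.Dict.mk v).get? "value" with
  | none => none
  | some price =>
    let discount := (PySem.Dict.mk v).getD "discount_value" 0
    let keyName := (PySem.Dict.mk pvNameMap).getD k ("Giá " ++ k)
    if discount > 0 then
      some (keyName ++ ": " ++ commaFmt price ++ " VNĐ (giảm " ++ commaFmt discount ++ " VNĐ)")
    else
      some (keyName ++ ": " ++ commaFmt price ++ " VNĐ")

def get_best_price_alt (prices : List (String × List (String × Int))) : String :=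
  if prices.isEmpty then ""
  else
    let pairs := prices.filterMap (fun kv =>
      (fmtEntry kv.1 kv.2).map (fun line => ((PySem.Dict.mk pvRank).getD kv.1 4, line)))
    let groups := pairs.foldl (fun d p => d.modify p.1 [] (· ++ [p.2])) PySem.Dict.empty
    PySem.Str.join "\n" ((PySem.List.pyRange 0 5 1).flatMap (fun r => groups.getD r []))

-- ===== PRECONDITION & SPEC =====
-- Pre_ excludes association lists with duplicate keys: they do not represent any Python dict
-- (A's input is a dict, whose keys are unique), so no Python input is excluded.
def Pre_get_best_price (prices : List (String × List (String × Int))) : Prop :=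
  (prices.map Prod.fst).Nodup
instance (prices : List (String × List (String × Int))) : Decidable (Pre_get_best_price prices) := by unfold Pre_get_best_price; infer_instance

def pvWitness_get_best_price : (List (String × List (String × Int))) :=
  [("root", [("value", 5000), ("discount_value", 500)]), ("xyz", [("value", 7)])]

def Spec_get_best_price (prices : List (String × List (String × Int))) (out : String) : Prop := out = get_best_price_alt prices
instance (prices : List (String × List (String × Int))) (out : String) : Decidable (Spec_get_best_price prices out) := by unfold Spec_get_best_price; infer_instance

-- ===== CLAIM (what is proved, stated in full; the proofs are below) =====
def Claim_equal_get_best_price : Prop := ∀ (prices : List (String × List (String × Int))), Dom_get_best_price prices → Pre_get_best_price prices → Spec_get_best_price prices (get_best_price prices)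

-- ===== LEMMAS AND PROOFS =====

theorem pv_if_and {α : Type} (c : Int) (x y : α) :
    (if c ≠ 0 ∧ c > 0 then x else y) = (if c > 0 then x else y) := by
  split_ifs with h1 h2 <;> first | rfl | omega

theorem stepA1_eq (prices : List (String × List (String × Int))) (acc : List String) (k : String) :
    pvStepA1 prices acc k = acc ++ (((PySem.Dict.mk prices).get? k).bind (fun v => fmtEntry k v)).toList := by
  unfold pvStepA1 fmtEntry
  rcases h : (PySem.Dict.mk prices).get? k with _ | v
  · simp
  · simp only [Option.bind_some]
    rcases h2 : (PySem.Dict.mk v).get? "value" with _ | price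
    · simp
    · simp only [pv_if_and]
      split_ifs <;> simp

theorem stepA2_eq (acc : List String) (kv : String × List (String × Int)) :
    pvStepA2 acc kv = acc ++ (if pvPriority.contains kv.1 then none else fmtEntry kv.1 kv.2).toList := by
  unfold pvStepA2 fmtEntry
  by_cases hc : kv.1 ∈ pvPriority
  · simp [hc]
  · simp only [List.contains_eq_mem, hc, decide_false, Bool.false_eq_true, if_false]
    rcases h2 : (PySem.Dict.mk kv.2).get? "value" with _ | price
    · simp
    · simp only [pv_if_and]
      split_ifs <;> simp

theorem foldl_append_toList {α : Type} (f : α → Option String) :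
    ∀ (l : List α) (acc : List String),
      l.foldl (fun a x => a ++ (f x).toList) acc = acc ++ l.filterMap f := by
  intro l
  induction l with
  | nil => intro acc; simp
  | cons x xs ih =>
    intro acc
    rw [List.foldl_cons, ih, List.filterMap_cons]
    cases f x <;> simp

theorem fold1_eq (prices : List (String × List (String × Int))) (acc : List String) :
    pvPriority.foldl (pvStepA1 prices) acc
      = acc ++ pvPriority.filterMap (fun k => ((PySem.Dict.mk prices).get? k).bind (fun v => fmtEntry k v)) := by
  rw [show pvStepA1 prices = (fun a k => a ++ (((PySem.Dict.mk prices).get? k).bind (fun v => fmtEntry k v)).toList)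
      from funext fun a => funext fun k => stepA1_eq prices a k]
  exact foldl_append_toList _ _ acc

theorem fold2_eq (prices : List (String × List (String × Int))) (acc : List String) :
    prices.foldl pvStepA2 acc
      = acc ++ (prices.filter (fun kv => !(pvPriority.contains kv.1))).filterMap (fun kv => fmtEntry kv.1 kv.2) := by
  rw [show pvStepA2 = (fun a kv => a ++ (if pvPriority.contains kv.1 then none else fmtEntry kv.1 kv.2).toList)
      from funext fun a => funext fun kv => stepA2_eq a kv]
  rw [foldl_append_toList]
  congr 1
  induction prices with
  | nil => rfl
  | cons kv kvs ih =>
    by_cases hc : kv.1 ∈ pvPriority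
    · simpa [List.filterMap_cons, hc] using ih
    · rcases h : fmtEntry kv.1 kv.2 with _ | s <;>
        · simp [hc, h]
          simpa using ih

-- rank characterization
theorem rank_cases (k : String) :
    (PySem.Dict.mk pvRank).getD k 4
      = if k = "special" then 0 else if k = "root" then 1 else if k = "smem" then 2
        else if k = "svip" then 3 else 4 := by
  by_cases h1 : k = "special"
  · subst h1; decide
  by_cases h2 : k = "root"
  · subst h2; decide
  by_cases h3 : k = "smem"
  · subst h3; decide
  by_cases h4 : k = "svip"
  · subst h4; decide
  simp [pvRank, PySem.Dict.getD_eq_get?_getD, PySem.Dict.get?_mk_cons, beq_iff_eq,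
    h1, h2, h3, h4, Ne.symm h1, Ne.symm h2, Ne.symm h3, Ne.symm h4]
  rfl

-- the r-bucket of B's tagged pairs is the fmt-filterMap of the rank-r entries
theorem pairs_filter_eq (r : Int) :
    ∀ (l : List (String × List (String × Int))),
      ((l.filterMap (fun kv => (fmtEntry kv.1 kv.2).map
          (fun line => ((PySem.Dict.mk pvRank).getD kv.1 4, line)))).filter
            (fun p => p.1 == r)).map (fun p => p.2)
        = (l.filter (fun kv => (PySem.Dict.mk pvRank).getD kv.1 4 == r)).filterMap
            (fun kv => fmtEntry kv.1 kv.2) := by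
  intro l
  induction l with
  | nil => rfl
  | cons kv t ih =>
    rcases h : fmtEntry kv.1 kv.2 with _ | s <;>
      by_cases hr : (PySem.Dict.mk pvRank).getD kv.1 4 = r <;>
        simp [h, hr, ih]

-- with distinct keys, filtering on one key is the (first-match) dict lookup
theorem filter_key_nodup (c : String) :
    ∀ (l : List (String × List (String × Int))), (l.map Prod.fst).Nodup →
      l.filter (fun kv => kv.1 == c)
        = (((PySem.Dict.mk l).get? c).map (fun v => (c, v))).toList := by
  intro l
  induction l with
  | nil => intro _; rfl
  | cons kv t ih =>
    intro hnd
    simp only [List.map_cons, List.nodup_cons] at hnd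
    rw [List.filter_cons, PySem.Dict.get?_mk_cons]
    by_cases hk : kv.1 = c
    · subst hk
      have : t.filter (fun kv' => kv'.1 == kv.1) = [] := by
        apply List.filter_eq_nil_iff.mpr
        intro p hp hq
        exact hnd.1 (List.mem_map.mpr ⟨p, hp, beq_iff_eq.mp hq⟩)
      simp [this]
    · have : (kv.1 == c) = false := by simp [hk]
      rw [this, if_neg (by exact fun hh => hk (by simpa using hh))]
      simpa using ih hnd.2

-- a rank-r bucket whose rank is attained exactly at key c is the first-match lookup of c
theorem g_prio (prices : List (String × List (String × Int)))
    (hnd : (prices.map Prod.fst).Nodup) (c : String) (r : Int)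
    (hc : ∀ k : String, ((PySem.Dict.mk pvRank).getD k 4 = r) ↔ k = c) :
    (prices.filter (fun kv => (PySem.Dict.mk pvRank).getD kv.1 4 == r)).filterMap
        (fun kv => fmtEntry kv.1 kv.2)
      = (((PySem.Dict.mk prices).get? c).bind (fun v => fmtEntry c v)).toList := by
  rw [show (fun kv : String × List (String × Int) => (PySem.Dict.mk pvRank).getD kv.1 4 == r)
        = (fun kv => kv.1 == c) from funext fun kv => by simp [hc kv.1]]
  rw [filter_key_nodup c prices hnd]
  rcases h : (PySem.Dict.mk prices).get? c with _ | v
  · rfl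
  · simp only [Option.map_some, Option.toList_some, List.filterMap_cons, List.filterMap_nil,
      Option.bind_some]
    cases fmtEntry c v <;> simp

-- the rank-4 bucket is exactly the non-priority entries
theorem g_rest (prices : List (String × List (String × Int))) :
    (prices.filter (fun kv => (PySem.Dict.mk pvRank).getD kv.1 4 == (4 : Int))).filterMap
        (fun kv => fmtEntry kv.1 kv.2)
      = (prices.filter (fun kv => !(pvPriority.contains kv.1))).filterMap
        (fun kv => fmtEntry kv.1 kv.2) := by
  congr 1
  apply List.filter_congr
  intro kv _
  rw [rank_cases]
  split_ifs <;> simp_all [pvPriority]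

theorem filterMap_four {α β : Type} (f : α → Option β) (a b c d : α) :
    List.filterMap f [a, b, c, d] = (f a).toList ++ ((f b).toList ++ ((f c).toList ++ (f d).toList)) := by
  rcases ha : f a <;> rcases hb : f b <;> rcases hc : f c <;> rcases hd : f d <;>
    simp [ha, hb, hc, hd]

theorem rank_iff_special (k : String) : ((PySem.Dict.mk pvRank).getD k 4 = 0) ↔ k = "special" := by
  rw [rank_cases]; split_ifs <;> simp_all

theorem rank_iff_root (k : String) : ((PySem.Dict.mk pvRank).getD k 4 = 1) ↔ k = "root" := by
  rw [rank_cases]; split_ifs <;> simp_all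

theorem rank_iff_smem (k : String) : ((PySem.Dict.mk pvRank).getD k 4 = 2) ↔ k = "smem" := by
  rw [rank_cases]; split_ifs <;> simp_all

theorem rank_iff_svip (k : String) : ((PySem.Dict.mk pvRank).getD k 4 = 3) ↔ k = "svip" := by
  rw [rank_cases]; split_ifs <;> simp_all

-- ===== VERDICT (by name: the statement is the Claim_ definition above) =====
theorem get_best_price_spec : Claim_equal_get_best_price := by
  intro prices _ hnd
  unfold Spec_get_best_price get_best_price get_best_price_alt
  by_cases he : prices.isEmpty
  · simp [he]
  · simp only [he, Bool.false_eq_true, if_false, fold1_eq, fold2_eq, List.nil_append]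
    congr 1
    rw [show PySem.List.pyRange 0 5 1 = [0, 1, 2, 3, 4] from by decide]
    simp only [List.flatMap_cons, List.flatMap_nil, PySem.Dict.getD_foldl_modify_append,
      PySem.Dict.getD_empty, List.nil_append, List.append_nil, pairs_filter_eq]
    rw [g_prio prices hnd "special" 0 rank_iff_special, g_prio prices hnd "root" 1 rank_iff_root,
      g_prio prices hnd "smem" 2 rank_iff_smem, g_prio prices hnd "svip" 3 rank_iff_svip,
      g_rest prices]
    rw [show pvPriority = ["special", "root", "smem", "svip"] from rfl, filterMap_four]
    simp [List.append_assoc]
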